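-- pv_equiv track=rewrite | github.com/mvdelt/2020testj | learnj/cotePracj/cotePracj copy 48.py | checkIfTreej
-- ===== SOURCE A (Python) =====
-- def checkIfTreej(hubo):
--     from collections import defaultdict
--     vmap = defaultdict(list)
--     for u,v in zip(hubo[::2], hubo[1::2]):
--         vmap[v]+=[u]
--
--     # 이제 tree가 맞는지 확인.
--     ## 1. 들어오는 간선이 하나도 없는 단 하나의 노드가 존재한다. 이를 루트(root) 노드라고 부른다.
--     ### root 1개인지 체크, 1개면 변수바인딩해놓음.
--     if len(vmap)+1 != len(set(hubo)):
--         return False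
--     root = next(iter(set(hubo)-set(vmap.keys())))
--
--     ## 2. 루트 노드를 제외한 모든 노드는 반드시 단 하나의 들어오는 간선이 존재한다.
--     for (v,uli) in vmap.items():
--         if len(uli)!=1: return False
--
--     ## 3. 루트에서 다른 노드로 가는 경로는 반드시 가능.
--     for v in vmap:
--         count=0
--         while v in vmap and count<=len(set(hubo))-1:
--             count+=1
--             v = vmap[v][0]
--         if count==len(set(hubo)) or v!=root:
--             return False
--     return True
-- ===== SOURCE B (Python) =====
-- def checkIfTreej(hubo):
--     edges = list(zip(hubo[::2], hubo[1::2]))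
--     nodes = set(hubo)
--     kids = [v for _, v in edges]
--     kidset = set(kids)
--     # a tree needs every child distinct (one incoming edge) and exactly one root
--     if len(kids) != len(kidset) or len(kidset) + 1 != len(nodes):
--         return False
--     root = (nodes - kidset).pop()
--     # grow the set of nodes reachable from the root downward; after len(nodes)
--     # rounds it is the full reachable set, and a tree reaches everything
--     reach = {root}
--     for _ in range(len(nodes)):
--         reach |= {v for u, v in edges if u in reach}
--     return len(reach) == len(nodes)
-- ===== Notes on version B (the rewrite author's own statement) =====
-- stated objective: alternative
-- what changed: A walks parent pointers upward from every node (rebuilding set(hubo) at each step) to see that each chain ends at the root; B searches in the opposite direction: after the degree/root checks it grows the set of nodes reachable downward from the root over the edge list and accepts iff that set covers every node.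
import Mathlib
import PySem

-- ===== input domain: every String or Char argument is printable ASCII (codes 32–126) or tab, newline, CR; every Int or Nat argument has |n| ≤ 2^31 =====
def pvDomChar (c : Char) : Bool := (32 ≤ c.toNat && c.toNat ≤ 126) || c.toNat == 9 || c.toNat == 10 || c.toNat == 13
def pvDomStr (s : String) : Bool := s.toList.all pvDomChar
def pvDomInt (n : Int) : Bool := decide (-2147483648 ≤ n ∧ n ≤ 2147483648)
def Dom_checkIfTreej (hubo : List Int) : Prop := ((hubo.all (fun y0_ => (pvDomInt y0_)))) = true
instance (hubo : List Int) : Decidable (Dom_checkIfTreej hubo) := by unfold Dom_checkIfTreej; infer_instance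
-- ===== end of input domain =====

-- B replaces A's per-node upward parent-chain walks by a single downward search:
-- degree checks up front, then a reachable set grown from the root over the edge
-- list, accepted iff it covers every node (alternative algorithm, opposite direction).

-- ===== PORT A =====
-- the while loop of A's check 3: while v in vmap and count <= bound: count += 1; v = vmap[v][0]
-- (vmap[v][0] is pyGetD uli 0 0: the lists in vmap are built by appends, hence never empty)
def pvWalkA (vmap : PySem.Dict Int (List Int)) (bound : Int) (v : Int) (count : Int) : Int × Int :=
  match vmap.get? v with
  | some uli =>
    if h : count ≤ bound then pvWalkA vmap bound (PySem.List.pyGetD uli 0 0) (count + 1)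
    else (v, count)
  | none => (v, count)
termination_by (bound + 1 - count).toNat
decreasing_by omega

def checkIfTreej (hubo : List Int) : Bool :=
  let pairs := ((PySem.List.slice? hubo none none 2).getD []).zip
               ((PySem.List.slice? hubo (some 1) none 2).getD [])
  let vmap := pairs.foldl (fun d p => d.modify p.2 [] (· ++ [p.1])) PySem.Dict.empty
  if (vmap.size : Int) + 1 ≠ PySem.Set.len (PySem.Set.ofList hubo) then false
  else
    -- next(iter(set(hubo) - set(vmap.keys()))): the difference is a singleton whenever
    -- this line is reached, so Python's set-iteration order cannot matter
    let root := (PySem.Set.diff (PySem.Set.ofList hubo) (PySem.Set.ofList vmap.keys)).headD 0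
    if vmap.items.any (fun p => p.2.length ≠ 1) then false
    else
      vmap.keys.all (fun v =>
        let wc := pvWalkA vmap (PySem.Set.len (PySem.Set.ofList hubo) - 1) v 0
        !(wc.2 == PySem.Set.len (PySem.Set.ofList hubo) || wc.1 != root))

-- ===== PORT B =====
def checkIfTreej_alt (hubo : List Int) : Bool :=
  let edges := ((PySem.List.slice? hubo none none 2).getD []).zip
               ((PySem.List.slice? hubo (some 1) none 2).getD [])
  let nodes := PySem.Set.ofList hubo
  let kids := edges.map (fun p => p.2)
  let kidset := PySem.Set.ofList kids
  if (kids.length : Int) ≠ PySem.Set.len kidset ∨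
     PySem.Set.len kidset + 1 ≠ PySem.Set.len nodes then false
  else
    -- (nodes - kidset).pop(): a singleton here, so .pop() is deterministic
    let root := (PySem.Set.diff nodes kidset).headD 0
    let reach := (PySem.List.pyRange 0 (PySem.Set.len nodes) 1).foldl
      (fun r _ => PySem.Set.union r (PySem.Set.ofList
        ((edges.filter (fun p => PySem.Set.contains r p.1)).map (fun p => p.2))))
      (PySem.Set.ofList [root])
    PySem.Set.len reach == PySem.Set.len nodes

-- ===== PRECONDITION & SPEC =====
def Spec_checkIfTreej (hubo : List Int) (out : Bool) : Prop := out = checkIfTreej_alt hubo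
instance (hubo : List Int) (out : Bool) : Decidable (Spec_checkIfTreej hubo out) := by unfold Spec_checkIfTreej; infer_instance

-- ===== CLAIM (what is proved, stated in full; the proofs are below) =====
def Claim_equal_checkIfTreej : Prop := ∀ (hubo : List Int), Dom_checkIfTreej hubo → Spec_checkIfTreej hubo (checkIfTreej hubo)

-- ===== LEMMAS AND PROOFS =====

-- proof-side name for A's dictionary-building fold (exactly the fold in port A)
def pvMkA (ps : List (Int × Int)) : PySem.Dict Int (List Int) :=
  ps.foldl (fun d p => d.modify p.2 [] (· ++ [p.1])) PySem.Dict.empty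

-- the unique-parent dictionary, used only by the proofs to name the parent step
def pvMkB (ps : List (Int × Int)) : PySem.Dict Int Int :=
  ps.foldl (fun d p => d.insert p.2 p.1) PySem.Dict.empty

-- B's per-round growth of the reachable set (exactly the fold body in port B)
def pvStep (ps : List (Int × Int)) (r : PySem.Set Int) : PySem.Set Int :=
  PySem.Set.union r (PySem.Set.ofList
    ((ps.filter (fun p => PySem.Set.contains r p.1)).map (fun p => p.2)))

theorem pvMkA_def (ps : List (Int × Int)) :
    pvMkA ps = ps.foldl (fun d p => d.modify p.2 [] (· ++ [p.1])) PySem.Dict.empty := rfl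

-- every element of a Python slice is an element of the sliced list
theorem pv_mem_sliceGetD {α : Type} {y : α} {xs : List α} (a b : Option Int) (st : Int)
    (h : y ∈ (PySem.List.slice? xs a b st).getD []) : y ∈ xs := by
  unfold PySem.List.slice? at h
  split at h
  · simp at h
  · rcases hsi : PySem.List.sliceIndices xs.length a b st with ⟨s, e, t⟩
    rw [hsi] at h
    simp only [Option.getD_some, List.mem_filterMap] at h
    obtain ⟨k, -, hk⟩ := h
    exact List.mem_of_getElem? hk

theorem pv_keysA (ps : List (Int × Int)) :
    (pvMkA ps).keys = PySem.Set.ofList (ps.map (fun p => p.2)) := by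
  simpa using PySem.Dict.keys_foldl_modify_key ps (fun p => p.2) []
    (fun _ p => (· ++ [p.1])) PySem.Dict.empty

theorem pv_keysB (ps : List (Int × Int)) :
    (pvMkB ps).keys = PySem.Set.ofList (ps.map (fun p => p.2)) := by
  simpa using PySem.Dict.keys_foldl_insert_key ps (fun p => p.2)
    (fun _ p => p.1) PySem.Dict.empty

theorem pv_nodup_keysA (ps : List (Int × Int)) : (pvMkA ps).keys.Nodup := by
  rw [pv_keysA]; exact PySem.Set.nodup_ofList _

theorem pv_getA (ps : List (Int × Int)) (v : Int) :
    (pvMkA ps).getD v [] =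
      ((ps.map (fun p => (p.2, p.1))).filter (fun q => q.1 == v)).map (fun q => q.2) := by
  have h := PySem.Dict.getD_foldl_modify_append
    (ps.map (fun p => (p.2, p.1))) (PySem.Dict.empty : PySem.Dict Int (List Int)) v
  rw [List.foldl_map] at h
  simpa [pvMkA] using h

theorem pv_lenA (ps : List (Int × Int)) (v : Int) :
    ((pvMkA ps).getD v []).length = (ps.map (fun p => p.2)).count v := by
  rw [pv_getA, List.length_map, ← List.countP_eq_length_filter, List.countP_map,
      List.count, List.countP_map]
  rfl

-- length of set(xs) against len(xs)
theorem pv_ofList_subperm {α : Type} [BEq α] [LawfulBEq α] (xs : List α) :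
    (PySem.Set.ofList xs).Subperm xs :=
  List.subperm_of_subset (PySem.Set.nodup_ofList xs)
    (fun y hy => (PySem.Set.mem_ofList xs y).1 hy)

theorem pv_ofList_len_iff {α : Type} [BEq α] [LawfulBEq α] (xs : List α) :
    (PySem.Set.ofList xs).length = xs.length ↔ xs.Nodup := by
  constructor
  · intro h
    have hp := (pv_ofList_subperm xs).perm_of_length_le (le_of_eq h.symm)
    exact hp.nodup_iff.1 (PySem.Set.nodup_ofList xs)
  · intro h
    have h1 := (pv_ofList_subperm xs).length_le
    have h2 := (List.subperm_of_subset h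
      (fun y hy => (PySem.Set.mem_ofList xs y).2 hy)).length_le
    omega

-- A's check 2 fires exactly when the child list has a duplicate
theorem pv_check2A (ps : List (Int × Int)) :
    ((pvMkA ps).items.any (fun p => p.2.length ≠ 1)) = !((ps.map (fun p => p.2)).Nodup) := by
  rcases hd : decide (ps.map (fun p => p.2)).Nodup with _ | _
  · rw [hd]
    simp only [decide_eq_false_iff_not, List.nodup_iff_count_le_one] at hd
    push_neg at hd
    obtain ⟨v, hv⟩ := hd
    have hmem : v ∈ ps.map (fun p => p.2) := by
      rw [← List.count_pos_iff]; omega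
    simp only [Bool.not_false, List.any_eq_true]
    refine ⟨(v, (pvMkA ps).getD v []), ?_, ?_⟩
    · rw [PySem.Dict.items_eq_map_keys _ (pv_nodup_keysA ps) []]
      simp only [List.mem_map]
      exact ⟨v, by rw [pv_keysA]; exact (PySem.Set.mem_ofList _ v).2 hmem, rfl⟩
    · simp only [decide_eq_true_eq, ne_eq, decide_not, Bool.not_eq_eq_eq_not, Bool.not_true,
        decide_eq_false_iff_not, pv_lenA]
      omega
  · rw [hd]
    simp only [decide_eq_true_eq, List.nodup_iff_count_le_one] at hd
    simp only [Bool.not_true, List.any_eq_false]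
    intro p hp
    rw [PySem.Dict.items_eq_map_keys _ (pv_nodup_keysA ps) []] at hp
    simp only [List.mem_map] at hp
    obtain ⟨v, hv, rfl⟩ := hp
    rw [pv_keysA] at hv
    have hvk := (PySem.Set.mem_ofList _ v).1 hv
    have h1 := hd v
    have h2 : 0 < (ps.map (fun p => p.2)).count v := List.count_pos_iff.2 hvk
    simp only [ne_eq, decide_not, Bool.not_eq_eq_eq_not, Bool.not_true, decide_eq_false_iff_not,
      Decidable.not_not, pv_lenA]
    omega

-- under no duplicate child, the two dictionaries agree edge-wise
theorem pv_dictRel (ps : List (Int × Int)) (hnd : (ps.map (fun p => p.2)).Nodup)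
    {u v : Int} (hm : (u, v) ∈ ps) :
    (pvMkA ps).getD v [] = [u] ∧ (pvMkB ps).getD v 0 = u := by
  constructor
  · have hlen : ((pvMkA ps).getD v []).length = 1 := by
      rw [pv_lenA]
      have h1 : 0 < (ps.map (fun p => p.2)).count v :=
        List.count_pos_iff.2 (List.mem_map.2 ⟨(u, v), hm, rfl⟩)
      have h2 := List.nodup_iff_count_le_one.1 hnd v
      omega
    have hu : u ∈ (pvMkA ps).getD v [] := by
      rw [pv_getA]
      simp only [List.mem_map, List.mem_filter]
      exact ⟨(v, u), ⟨⟨(u, v), hm, rfl⟩, by simp⟩, rfl⟩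
    obtain ⟨a, ha⟩ := List.length_eq_one_iff.1 hlen
    rw [ha] at hu ⊢
    simp at hu
    rw [hu]
  · have hfresh : ∀ p ∈ ps, (PySem.Dict.empty : PySem.Dict Int Int).contains p.2 = false := by
      intro p _; simp [PySem.Dict.contains_empty]
    have hitems := PySem.Dict.items_foldl_insert_fresh ps (fun p => p.2) (fun p => p.1)
      PySem.Dict.empty hfresh hnd
    have hmem : (v, u) ∈ (pvMkB ps).items := by
      unfold pvMkB
      rw [hitems]
      exact List.mem_append.2 (Or.inr (List.mem_map.2 ⟨(u, v), hm, rfl⟩))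
    exact PySem.Dict.getD_of_mem_items _ hmem
      (by rw [pv_keysB]; exact PySem.Set.nodup_ofList _) 0

-- ===== A's walk against iteration of the parent step =====

theorem pv_walk_stop (dA : PySem.Dict Int (List Int)) (b v c : Int)
    (h : dA.get? v = none) : pvWalkA dA b v c = (v, c) := by
  unfold pvWalkA; rw [h]

theorem pv_walk_over (dA : PySem.Dict Int (List Int)) (b v c : Int)
    (h : ¬ c ≤ b) : pvWalkA dA b v c = (v, c) := by
  unfold pvWalkA
  cases dA.get? v <;> simp [h]

theorem pv_walk_step (dA : PySem.Dict Int (List Int)) (b v c : Int) {l : List Int}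
    (h : dA.get? v = some l) (hc : c ≤ b) :
    pvWalkA dA b v c = pvWalkA dA b (PySem.List.pyGetD l 0 0) (c + 1) := by
  conv_lhs => unfold pvWalkA
  rw [h]; simp [hc]

-- a non-key of the parent dict is a fixed point of the parent step
theorem pv_fix (dB : PySem.Dict Int Int) (x : Int) (h : dB.contains x = false) :
    ∀ m : Nat, (fun y => dB.getD y y)^[m] x = x := by
  intro m
  induction m with
  | zero => rfl
  | succ m ih =>
    rw [Function.iterate_succ_apply]
    simp only [PySem.Dict.getD_of_not_contains dB x h]
    exact ih

-- unfolding A's walk along k steps that stay inside the dictionary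
theorem pv_walk_iter (dA : PySem.Dict Int (List Int)) (dB : PySem.Dict Int Int) (b : Int)
    (hrel : ∀ x, dB.contains x = true → dA.get? x = some [dB.getD x x])
    (k : Nat) (v : Int) (c : Int)
    (hin : ∀ i < k, dB.contains ((fun y => dB.getD y y)^[i] v) = true)
    (hc : c + k ≤ b + 1) :
    pvWalkA dA b v c = pvWalkA dA b ((fun y => dB.getD y y)^[k] v) (c + k) := by
  induction k generalizing v c with
  | zero => simp
  | succ k ih =>
    have h0 := hrel v (by simpa using hin 0 (Nat.succ_pos k))
    have hstep := pv_walk_step dA b v c h0 (by push_cast at hc ⊢; omega)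
    rw [hstep]
    have := ih (dB.getD v v) (c + 1)
      (fun i hi => by
        rw [← Function.iterate_succ_apply]
        exact hin (i + 1) (by omega))
      (by push_cast at hc ⊢; omega)
    simpa [Function.iterate_succ_apply, PySem.List.pyGetD_zero, add_assoc, add_comm,
      add_left_comm] using this

-- a chain that repeats keeps revisiting its prefix forever
theorem pv_periodic (f : Int → Int) (v : Int) {i j : Nat} (hij : i < j)
    (heq : f^[i] v = f^[j] v) : ∀ m, ∃ l < j, f^[m] v = f^[l] v := by
  intro m
  induction m using Nat.strong_induction_on with
  | _ m ih =>
    by_cases hm : m < j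
    · exact ⟨m, hm, rfl⟩
    · push_neg at hm
      have h1 : f^[m] v = f^[m - j + i] v := by
        conv_lhs => rw [show m = (m - j) + j from by omega]
        rw [Function.iterate_add_apply, ← heq, ← Function.iterate_add_apply]
      obtain ⟨l, hl, he⟩ := ih (m - j + i) (by omega)
      exact ⟨l, hl, h1.trans he⟩

-- pigeonhole: n chain values inside a nodup key list of length n-1 must repeat
theorem pv_pigeon (f : Int → Int) (v : Int) (K : List Int) (n : Nat)
    (hnd : K.Nodup) (hlen : K.length + 1 = n)
    (hall : ∀ i < n, f^[i] v ∈ K) :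
    ∃ i j, i < j ∧ j < n ∧ f^[i] v = f^[j] v := by
  have hcard : K.toFinset.card < (Finset.range n).card := by
    rw [List.toFinset_card_of_nodup hnd, Finset.card_range]; omega
  have hmaps : Set.MapsTo (fun i => f^[i] v) ↑(Finset.range n) ↑K.toFinset := by
    intro i hi
    simp only [Finset.coe_range, Set.mem_Iio] at hi
    simp only [Finset.coe_sort_coe, List.coe_toFinset, Set.mem_setOf_eq]
    exact hall i hi
  obtain ⟨a, ha, b, hb, hne, heq⟩ :=
    Finset.exists_ne_map_eq_of_card_lt_of_maps_to hcard hmaps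
  simp only [Finset.mem_range] at ha hb
  rcases lt_or_gt_of_ne hne with h | h
  · exact ⟨a, b, h, hb, heq⟩
  · exact ⟨b, a, h, ha, heq.symm⟩

-- the per-key value of A's check 3 as the n-fold parent iterate hitting the root
theorem pv_per_key (dA : PySem.Dict Int (List Int)) (dB : PySem.Dict Int Int)
    (root : Int) (n : Nat)
    (hrel : ∀ x, dB.contains x = true → dA.get? x = some [dB.getD x x])
    (hrel0 : ∀ x, dB.contains x = false → dA.get? x = none)
    (hnd : dB.keys.Nodup) (hlen : dB.keys.length + 1 = n)
    (hroot : root ∉ dB.keys) (v : Int) :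
    (!((pvWalkA dA ((n : Int) - 1) v 0).2 == (n : Int) ||
       (pvWalkA dA ((n : Int) - 1) v 0).1 != root))
      = ((fun y => dB.getD y y)^[n] v == root) := by
  set f : Int → Int := fun y => dB.getD y y with hf
  by_cases hall : ∀ i < n, dB.contains (f^[i] v) = true
  · have hw := pv_walk_iter dA dB ((n : Int) - 1) hrel n v 0 hall (by omega)
    rw [hw, pv_walk_over _ _ _ _ (show ¬ ((0 : Int) + (n : Nat)) ≤ (n : Int) - 1 by omega)]
    have hmemK : ∀ i < n, f^[i] v ∈ dB.keys := fun i hi =>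
      (PySem.Dict.contains_iff_mem_keys dB _).1 (hall i hi)
    obtain ⟨i, j, hij, hjn, heq⟩ := pv_pigeon f v dB.keys n hnd hlen hmemK
    obtain ⟨l, hl, he⟩ := pv_periodic f v hij heq n
    have hne : f^[n] v ≠ root := by
      rw [he]; intro hc; exact hroot (hc ▸ hmemK l (by omega))
    simp [hne]
  · push_neg at hall
    have hex : ∃ k, dB.contains (f^[k] v) = false := by
      obtain ⟨i, _, hi⟩ := hall
      exact ⟨i, by simpa using hi⟩
    classical
    set k := Nat.find hex with hk
    have hkf : dB.contains (f^[k] v) = false := Nat.find_spec hex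
    have hkmin : ∀ i < k, dB.contains (f^[i] v) = true := by
      intro i hi
      have := Nat.find_min hex hi
      simpa using this
    have hkn : k < n := by
      by_contra hge
      push_neg at hge
      obtain ⟨i, hi, hic⟩ := hall
      exact hic (hkmin i (by omega))
    have hw := pv_walk_iter dA dB ((n : Int) - 1) hrel k v 0 hkmin (by omega)
    rw [hw, pv_walk_stop _ _ _ _ (hrel0 _ hkf)]
    have hiter : f^[n] v = f^[k] v := by
      have : n = (n - k) + k := by omega
      rw [this, Function.iterate_add_apply]
      exact pv_fix dB (f^[k] v) hkf (n - k)
    rw [hiter]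
    by_cases hr : f^[k] v = root
    · simp [hr, show ¬ (k = n) from by omega]
    · have hbe : (f^[k] v == root) = false := by simp [hr]
      simp [bne, hbe]

-- Bool.all over the same list with pointwise-equal predicates
theorem pv_all_congr {α : Type} (l : List α) (p q : α → Bool)
    (h : ∀ x ∈ l, p x = q x) : l.all p = l.all q := by
  induction l with
  | nil => rfl
  | cons a t ih => simp only [List.all_cons, h a (by simp), ih fun x hx => h x (by simp [hx])]

-- ===== B's reachable-set growth against the parent iterate =====

-- membership in one growth round
theorem pv_step_mem (ps : List (Int × Int)) (r : PySem.Set Int) (y : Int) :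
    y ∈ pvStep ps r ↔ y ∈ r ∨ ∃ p ∈ ps, p.1 ∈ r ∧ y = p.2 := by
  simp only [pvStep, PySem.Set.mem_union, PySem.Set.mem_ofList, List.mem_map,
    List.mem_filter, PySem.Set.contains_iff]
  constructor
  · rintro (h | ⟨p, ⟨hp, hc⟩, rfl⟩)
    · exact Or.inl h
    · exact Or.inr ⟨p, hp, hc, rfl⟩
  · rintro (h | ⟨p, hp, hc, rfl⟩)
    · exact Or.inl h
    · exact Or.inr ⟨p, ⟨hp, hc⟩, rfl⟩

theorem pv_step_nodup (ps : List (Int × Int)) (r : PySem.Set Int) (h : r.Nodup) :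
    (pvStep ps r).Nodup := PySem.Set.nodup_union _ _ h

theorem pv_iter_nodup (ps : List (Int × Int)) (r : PySem.Set Int) (h : r.Nodup) (k : Nat) :
    ((pvStep ps)^[k] r).Nodup := by
  induction k with
  | zero => exact h
  | succ k ih => rw [Function.iterate_succ_apply']; exact pv_step_nodup _ _ ih

-- the fold of port B is the k-fold iterate of pvStep
theorem pv_fold_eq_iter (ps : List (Int × Int)) (l : List Int) (r : PySem.Set Int) :
    l.foldl (fun r _ => PySem.Set.union r (PySem.Set.ofList
        ((ps.filter (fun p => PySem.Set.contains r p.1)).map (fun p => p.2)))) r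
      = (pvStep ps)^[l.length] r := by
  induction l generalizing r with
  | nil => rfl
  | cons a t ih => simp only [List.foldl_cons, List.length_cons,
      Function.iterate_succ_apply, ih]; rfl

-- after k rounds: reachable from the root iff the k-fold parent iterate hits the root
theorem pv_reach_mem (ps : List (Int × Int)) (root : Int)
    (hnd : (ps.map (fun p => p.2)).Nodup)
    (hroot : root ∉ ps.map (fun p => p.2))
    (hpar : ∀ v ∈ ps.map (fun p => p.2),
      (pvMkB ps).getD v v = root ∨ (pvMkB ps).getD v v ∈ ps.map (fun p => p.2))
    (k : Nat) (y : Int) :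
    y ∈ (pvStep ps)^[k] (PySem.Set.ofList [root]) ↔
      (y = root ∨ y ∈ ps.map (fun p => p.2)) ∧
        (fun x => (pvMkB ps).getD x x)^[k] y = root := by
  set f : Int → Int := fun x => (pvMkB ps).getD x x with hf
  have hcontB : ∀ x, (pvMkB ps).contains x = true ↔ x ∈ ps.map (fun p => p.2) := by
    intro x
    rw [PySem.Dict.contains_iff_mem_keys, pv_keysB, PySem.Set.mem_ofList]
  have hfixroot : ∀ m : Nat, f^[m] root = root := by
    intro m
    exact pv_fix (pvMkB ps) root (by
      rcases hc : (pvMkB ps).contains root with _ | _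
      · rfl
      · exact absurd ((hcontB root).1 hc) hroot) m
  have hfkid : ∀ x ∈ ps.map (fun p => p.2), ∃ u, (u, x) ∈ ps ∧ f x = u := by
    intro x hx
    obtain ⟨p, hp, hpx⟩ := List.mem_map.1 hx
    refine ⟨p.1, by rwa [show ((p.1 : Int), x) = p by rw [← hpx]], ?_⟩
    have := (pv_dictRel ps hnd (by rwa [show ((p.1 : Int), x) = p by rw [← hpx]])).2
    show (pvMkB ps).getD x x = p.1
    rw [PySem.Dict.getD_eq_get?_getD] at this ⊢
    cases hg : (pvMkB ps).get? x with
    | none =>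
      exfalso
      rw [PySem.Dict.get?_eq_none_iff_not_mem_keys, pv_keysB, PySem.Set.mem_ofList] at hg
      exact hg hx
    | some w => rw [hg] at this; simpa using this
  induction k generalizing y with
  | zero =>
    simp only [Function.iterate_zero, id]
    constructor
    · intro h
      have : y = root := by simpa [PySem.Set.ofList] using h
      exact ⟨Or.inl this, this⟩
    · rintro ⟨-, rfl⟩
      simp [PySem.Set.ofList]
  | succ k ih =>
    rw [Function.iterate_succ_apply', pv_step_mem]
    constructor
    · rintro (h | ⟨p, hp, hin, rfl⟩)
      · obtain ⟨hm, hr⟩ := (ih _).1 h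
        refine ⟨hm, ?_⟩
        rw [Function.iterate_succ_apply', hr]
        simpa using hfixroot 1
      · have hkid : p.2 ∈ ps.map (fun q => q.2) := List.mem_map.2 ⟨p, hp, rfl⟩
        obtain ⟨hm, hr⟩ := (ih _).1 hin
        obtain ⟨u, hu, hfu⟩ := hfkid p.2 hkid
        have : u = p.1 := by
          have h1 := (pv_dictRel ps hnd hu).1
          have h2 := (pv_dictRel ps hnd (show (p.1, p.2) ∈ ps from hp)).1
          have := h1.symm.trans h2
          simpa using this
        refine ⟨Or.inr hkid, ?_⟩
        rw [Function.iterate_succ_apply, hfu, this, hr]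
    · rintro ⟨hm, hr⟩
      rcases hm with hy | hkid
      · exact Or.inl ((ih y).2 ⟨Or.inl hy, by rw [hy]; exact hfixroot k⟩)
      · obtain ⟨u, hu, hfu⟩ := hfkid y hkid
        rw [Function.iterate_succ_apply, hfu] at hr
        have hum : u = root ∨ u ∈ ps.map (fun p => p.2) := by
          have := hpar y hkid
          rw [← hfu]
          simp only [hf]
          exact this
        exact Or.inr ⟨(u, y), hu, (ih u).2 ⟨hum, hr⟩, rfl⟩

-- ===== VERDICT (by name: the statement is the Claim_ definition above) =====
theorem checkIfTreej_spec : Claim_equal_checkIfTreej := by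
  intro hubo _
  unfold Spec_checkIfTreej checkIfTreej checkIfTreej_alt
  dsimp only
  set evens := (PySem.List.slice? hubo none none 2).getD [] with hev
  set odds := (PySem.List.slice? hubo (some 1) none 2).getD [] with hod
  set ps := evens.zip odds with hps
  set kids := ps.map (fun p => p.2) with hkids
  set S := PySem.Set.ofList hubo with hS
  rw [← pvMkA_def ps]
  have hsizeA : (pvMkA ps).size = (PySem.Set.ofList kids).length := by
    show (pvMkA ps).items.length = _
    have := congrArg List.length (pv_keysA ps)
    simpa [PySem.Dict.keys] using this
  by_cases hnd : kids.Nodup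
  case neg =>
    have hB : ((kids.length : Int) ≠ PySem.Set.len (PySem.Set.ofList kids) ∨
        PySem.Set.len (PySem.Set.ofList kids) + 1 ≠ PySem.Set.len S) := by
      left
      simp only [PySem.Set.len, ne_eq, Int.natCast_inj]
      exact fun hc => hnd ((pv_ofList_len_iff kids).1 hc.symm)
    rw [if_pos hB]
    by_cases h1 : ((pvMkA ps).size : Int) + 1 ≠ PySem.Set.len S
    · rw [if_pos h1]
    · rw [if_neg h1, if_pos (show ((pvMkA ps).items.any fun p => decide (p.2.length ≠ 1)) = true by
        rw [pv_check2A ps, ← hkids]; simp [hnd])]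
  case pos =>
    by_cases h1 : ((pvMkA ps).size : Int) + 1 ≠ PySem.Set.len S
    · rw [if_pos h1, if_pos (show ((kids.length : Int) ≠ PySem.Set.len (PySem.Set.ofList kids) ∨
        PySem.Set.len (PySem.Set.ofList kids) + 1 ≠ PySem.Set.len S) by
        right
        intro hc
        apply h1
        rw [← hc]
        simp only [PySem.Set.len, hsizeA])]
    · rw [if_neg h1, if_neg (show ¬ ((kids.length : Int) ≠ PySem.Set.len (PySem.Set.ofList kids) ∨
        PySem.Set.len (PySem.Set.ofList kids) + 1 ≠ PySem.Set.len S) by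
        push_neg
        constructor
        · simp only [PySem.Set.len, Int.natCast_inj]
          exact ((pv_ofList_len_iff kids).2 hnd).symm
        · push_neg at h1
          rw [← h1]
          simp only [PySem.Set.len, hsizeA])]
      rw [if_neg (show ¬ ((pvMkA ps).items.any fun p => decide (p.2.length ≠ 1)) = true by
        rw [pv_check2A ps, ← hkids]; simp [hnd])]
      push_neg at h1
      set n : Nat := S.length with hn
      have hlenS : PySem.Set.len S = (n : Int) := rfl
      have hkeysA := pv_keysA ps
      have hkeysB := pv_keysB ps
      have hndK : (pvMkB ps).keys.Nodup := by rw [hkeysB]; exact PySem.Set.nodup_ofList _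
      have hlenK : (pvMkB ps).keys.length + 1 = n := by
        have h2 : (pvMkB ps).keys.length = (PySem.Set.ofList kids).length := by
          rw [hkeysB]
        have h4 : ((pvMkA ps).size : Int) + 1 = ((n : Nat) : Int) := h1
        rw [hsizeA] at h4
        have h5 : ((pvMkB ps).keys.length : Int) + 1 = ((n : Nat) : Int) := by
          rw [h2]; exact_mod_cast h4
        exact_mod_cast h5
      have hmemkid : ∀ x, x ∈ (pvMkB ps).keys → ∃ u, (u, x) ∈ ps := by
        intro x hx
        rw [hkeysB] at hx
        have := (PySem.Set.mem_ofList _ x).1 hx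
        obtain ⟨p, hp, hpx⟩ := List.mem_map.1 this
        exact ⟨p.1, by rwa [show ((p.1 : Int), x) = p by rw [← hpx]]⟩
      have hrel : ∀ x, (pvMkB ps).contains x = true →
          (pvMkA ps).get? x = some [(pvMkB ps).getD x x] := by
        intro x hx
        obtain ⟨u, hu⟩ := hmemkid x ((PySem.Dict.contains_iff_mem_keys _ _).1 hx)
        obtain ⟨hA, hBv⟩ := pv_dictRel ps hnd hu
        have hcA : (pvMkA ps).contains x = true := by
          rw [PySem.Dict.contains_iff_mem_keys, hkeysA, ← hkeysB]
          exact (PySem.Dict.contains_iff_mem_keys _ _).1 hx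
        rw [PySem.Dict.contains_eq_isSome_get?] at hcA
        obtain ⟨l, hl⟩ := Option.isSome_iff_exists.1 hcA
        have hgd : (pvMkA ps).getD x [] = l := by rw [PySem.Dict.getD_eq_get?_getD, hl]; rfl
        have hlu : l = [u] := hgd.symm.trans hA
        have hBu : (pvMkB ps).getD x x = u := by
          rw [PySem.Dict.getD_eq_get?_getD] at hBv ⊢
          cases hg : (pvMkB ps).get? x with
          | none => rw [PySem.Dict.contains_eq_isSome_get?, hg] at hx; simp at hx
          | some w => rw [hg] at hBv; simpa using hBv
        rw [hl, hlu, hBu]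
      have hrel0 : ∀ x, (pvMkB ps).contains x = false → (pvMkA ps).get? x = none := by
        intro x hx
        rw [PySem.Dict.get?_eq_none_iff_not_mem_keys, hkeysA, ← hkeysB]
        intro hc
        rw [(PySem.Dict.contains_iff_mem_keys _ _).2 hc] at hx
        exact absurd hx (by simp)
      -- the elements of S outside the children form the singleton [root]
      have hsub : (pvMkB ps).keys ⊆ S := by
        intro x hx
        obtain ⟨u, hu⟩ := hmemkid x hx
        have hxo : x ∈ odds := (List.of_mem_zip hu).2
        rw [hS]
        exact (PySem.Set.mem_ofList hubo x).2 (pv_mem_sliceGetD (some 1) none 2 hxo)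
      have hdiffsub : PySem.Set.diff S (pvMkB ps).keys ⊆ S := by
        intro x hx
        exact ((PySem.Set.mem_diff _ _ _).1 hx).1
      have hdifflen : (PySem.Set.diff S (pvMkB ps).keys).length ≤ 1 := by
        by_contra hc
        push_neg at hc
        have hndD : (PySem.Set.diff S (pvMkB ps).keys).Nodup :=
          PySem.Set.nodup_diff _ _ (hS ▸ PySem.Set.nodup_ofList hubo)
        have hndA : ((pvMkB ps).keys ++ PySem.Set.diff S (pvMkB ps).keys).Nodup := by
          rw [List.nodup_append]
          exact ⟨hndK, hndD, fun a ha b hb hab => by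
            subst hab
            exact ((PySem.Set.mem_diff _ _ _).1 hb).2 ha⟩
        have hsub2 : ((pvMkB ps).keys ++ PySem.Set.diff S (pvMkB ps).keys) ⊆ S := by
          intro x hx
          rcases List.mem_append.1 hx with h | h
          · exact hsub h
          · exact hdiffsub h
        have := (List.subperm_of_subset hndA hsub2).length_le
        rw [List.length_append] at this
        have hSn : S.length = n := hn.symm
        omega
      have hdiffne : PySem.Set.diff S (pvMkB ps).keys ≠ [] := by
        intro hc
        have hsub2 : S ⊆ (pvMkB ps).keys := by
          intro y hy
          by_contra hyk
          have : y ∈ PySem.Set.diff S (pvMkB ps).keys :=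
            (PySem.Set.mem_diff S _ y).2 ⟨hy, hyk⟩
          rw [hc] at this
          exact absurd this (by simp)
        have := (List.subperm_of_subset (hS ▸ PySem.Set.nodup_ofList hubo) hsub2).length_le
        omega
      obtain ⟨r0, hr0⟩ : ∃ r0, PySem.Set.diff S (pvMkB ps).keys = [r0] := by
        cases hD : PySem.Set.diff S (pvMkB ps).keys with
        | nil => exact absurd hD hdiffne
        | cons a t =>
          refine ⟨a, ?_⟩
          have : t.length = 0 := by
            have := hdifflen
            rw [hD] at this
            simpa using this
          rw [List.length_eq_zero_iff] at this
          rw [this]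
      -- both ports name the same root
      have hsetkeys : PySem.Set.ofList (pvMkA ps).keys = (pvMkA ps).keys :=
        PySem.Set.ofList_eq_self_of_nodup ((pvMkA ps).keys) (pv_nodup_keysA ps)
      have hrootA : (PySem.Set.diff S (PySem.Set.ofList (pvMkA ps).keys)).headD 0 = r0 := by
        rw [hsetkeys, hkeysA, ← hkeysB, hr0]; rfl
      have hrootB : (PySem.Set.diff S (PySem.Set.ofList kids)).headD 0 = r0 := by
        rw [← hkeysB, hr0]; rfl
      set f : Int → Int := fun x => (pvMkB ps).getD x x with hf
      have hrootS : r0 ∈ S ∧ r0 ∉ (pvMkB ps).keys := by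
        have : r0 ∈ PySem.Set.diff S (pvMkB ps).keys := by rw [hr0]; simp
        exact (PySem.Set.mem_diff _ _ _).1 this
      have hrootK : r0 ∉ kids := by
        intro hc
        exact hrootS.2 (by rw [hkeysB]; exact (PySem.Set.mem_ofList _ _).2 hc)
      -- every parent is the root or a child
      have hpar : ∀ v ∈ kids, f v = r0 ∨ f v ∈ kids := by
        intro v hv
        obtain ⟨p, hp, hpv⟩ := List.mem_map.1 hv
        have hedge : (p.1, v) ∈ ps := by rwa [show ((p.1 : Int), v) = p by rw [← hpv]]
        have hfv : f v = p.1 := by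
          have := (pv_dictRel ps hnd hedge).2
          show (pvMkB ps).getD v v = p.1
          rw [PySem.Dict.getD_eq_get?_getD] at this ⊢
          cases hg : (pvMkB ps).get? v with
          | none =>
            exfalso
            rw [PySem.Dict.get?_eq_none_iff_not_mem_keys, hkeysB, PySem.Set.mem_ofList] at hg
            exact hg hv
          | some w => rw [hg] at this; simpa using this
        have hp1S : p.1 ∈ S := by
          have hxe : p.1 ∈ evens := (List.of_mem_zip hedge).1
          rw [hS]
          exact (PySem.Set.mem_ofList hubo _).2 (pv_mem_sliceGetD none none 2 hxe)
        rw [hfv]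
        by_cases hk : p.1 ∈ kids
        · exact Or.inr hk
        · left
          have : p.1 ∈ PySem.Set.diff S (pvMkB ps).keys := by
            refine (PySem.Set.mem_diff _ _ _).2 ⟨hp1S, ?_⟩
            rw [hkeysB, PySem.Set.mem_ofList]
            exact hk
          rw [hr0] at this
          simpa using this
      -- reduce A's side to "every child's n-fold parent iterate is the root"
      rw [hrootA, hrootB]
      have hAside : ((pvMkA ps).keys.all (fun v =>
          !((pvWalkA (pvMkA ps) (PySem.Set.len S - 1) v 0).2 == PySem.Set.len S ||
            (pvWalkA (pvMkA ps) (PySem.Set.len S - 1) v 0).1 != r0)))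
          = (pvMkB ps).keys.all (fun v => f^[n] v == r0) := by
        rw [hkeysA, ← hkeysB]
        apply pv_all_congr
        intro v hv
        rw [hlenS]
        exact pv_per_key (pvMkA ps) (pvMkB ps) r0 n hrel hrel0 hndK hlenK hrootS.2 v
      rw [hAside]
      -- reduce B's side: the fold is the n-fold iterate of pvStep
      rw [pv_fold_eq_iter ps _ (PySem.Set.ofList [r0])]
      have hlenRange : (PySem.List.pyRange 0 (PySem.Set.len S) 1).length = n := by
        rw [hlenS, PySem.List.length_pyRange_one]
        simp
      rw [hlenRange]
      set reach := (pvStep ps)^[n] (PySem.Set.ofList [r0]) with hreach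
      have hparK : ∀ v ∈ ps.map (fun p => p.2),
          (pvMkB ps).getD v v = r0 ∨ (pvMkB ps).getD v v ∈ ps.map (fun p => p.2) := by
        intro v hv
        exact hpar v hv
      have hmemreach := pv_reach_mem ps r0 hnd hrootK hparK n
      have hreachnd : reach.Nodup :=
        pv_iter_nodup ps _ (by simp [PySem.Set.ofList]) n
      have hrkeysnd : (r0 :: (pvMkB ps).keys).Nodup := by
        rw [List.nodup_cons]
        exact ⟨hrootS.2, hndK⟩
      have hkeymem : ∀ x, x ∈ (pvMkB ps).keys ↔ x ∈ kids := by
        intro x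
        rw [hkeysB, PySem.Set.mem_ofList, hkids]
      -- the two booleans agree
      by_cases hok : ∀ v ∈ (pvMkB ps).keys, f^[n] v = r0
      · have hsup : ∀ x ∈ (r0 :: (pvMkB ps).keys), x ∈ reach := by
          intro x hx
          rw [hreach, hmemreach]
          rcases List.mem_cons.1 hx with rfl | hk
          · exact ⟨Or.inl rfl, by
              exact pv_fix (pvMkB ps) x (by
                rcases hc : (pvMkB ps).contains x with _ | _
                · rfl
                · exact absurd ((PySem.Dict.contains_iff_mem_keys _ _).1 hc) hrootS.2) n⟩
          · exact ⟨Or.inr ((hkeymem x).1 hk), hok x hk⟩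
        have hsubr : ∀ x ∈ reach, x ∈ (r0 :: (pvMkB ps).keys) := by
          intro x hx
          rw [hreach, hmemreach] at hx
          rcases hx.1 with rfl | hk
          · exact List.mem_cons_self
          · exact List.mem_cons_of_mem _ ((hkeymem x).2 hk)
        have hperm : reach.Perm (r0 :: (pvMkB ps).keys) :=
          (List.perm_ext_iff_of_nodup hreachnd hrkeysnd).2
            (fun x => ⟨hsubr x, hsup x⟩)
        have hlr : reach.length = n := by
          have := hperm.length_eq
          simp only [List.length_cons] at this
          omega
        have hBtrue : (PySem.Set.len reach == PySem.Set.len S) = true := by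
          simp only [PySem.Set.len, hlr, hn, beq_iff_eq]
        rw [hBtrue]
        rw [List.all_eq_true]
        intro v hv
        simp only [beq_iff_eq]
        exact hok v hv
      · push_neg at hok
        obtain ⟨v, hvk, hvne⟩ := hok
        have hvnot : v ∉ reach := by
          rw [hreach, hmemreach]
          rintro ⟨-, hr⟩
          exact hvne hr
        have hsubr : reach ⊆ (r0 :: (pvMkB ps).keys) := by
          intro x hx
          rw [hreach, hmemreach] at hx
          rcases hx.1 with rfl | hk
          · exact List.mem_cons_self
          · exact List.mem_cons_of_mem _ ((hkeymem x).2 hk)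
        have hsp := (List.subperm_of_subset hreachnd hsubr).length_le
        have hlt : reach.length < n := by
          rcases Nat.lt_or_ge reach.length n with h | h
          · exact h
          · exfalso
            have hlenc : (r0 :: (pvMkB ps).keys).length = n := by
              simp only [List.length_cons]; omega
            have hperm := (List.subperm_of_subset hreachnd hsubr).perm_of_length_le
              (by omega)
            exact hvnot (hperm.mem_iff.2 (List.mem_cons_of_mem _ hvk))
        have hBfalse : (PySem.Set.len reach == PySem.Set.len S) = false := by
          simp only [PySem.Set.len, hn, beq_eq_false_iff_ne, ne_eq, Int.natCast_inj]
          omega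
        rw [hBfalse]
        rw [List.all_eq_false]
        exact ⟨v, hvk, by simp [hvne]⟩
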